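-- pv_equiv track=rewrite | github.com/HarryMayne/rule_articulation_faithfulness | src/rules/decoy_rules.py | rule_10_decoy_1
-- ===== SOURCE A (Python) =====
-- def rule_10_decoy_1(s: str) -> bool:
--     """
--     The string is accepted when its parentheses are balanced and at least one pair encloses an uppercase letter.
--     """
--     stack = []
--     segments = []
--     for idx, ch in enumerate(s):
--         if ch == "(":
--             stack.append(idx)
--         elif ch == ")":
--             if not stack:
--                 return False
--             start = stack.pop()
--             segments.append(s[start + 1 : idx])
--     if stack or not segments:
--         return False
--     return any(any("A" <= ch <= "Z" for ch in segment) for segment in segments)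
-- ===== SOURCE B (Python) =====
-- def rule_10_decoy_1(s: str) -> bool:
--     depth = 0
--     closed = False
--     upper = False
--     for ch in s:
--         if ch == "(":
--             depth += 1
--         elif ch == ")":
--             if depth == 0:
--                 return False
--             depth -= 1
--             closed = True
--         elif depth > 0 and "A" <= ch <= "Z":
--             upper = True
--     return depth == 0 and closed and upper
-- ===== Notes on version B (the rewrite author's own statement) =====
-- stated objective: simpler
-- what changed: Replaced A's stack of indices plus a list of sliced-out segments (scanned again at the end) with a single pass that keeps only a depth counter and two flags: a pair has closed, and an uppercase letter was seen while at least one paren was open.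
import Mathlib
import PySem

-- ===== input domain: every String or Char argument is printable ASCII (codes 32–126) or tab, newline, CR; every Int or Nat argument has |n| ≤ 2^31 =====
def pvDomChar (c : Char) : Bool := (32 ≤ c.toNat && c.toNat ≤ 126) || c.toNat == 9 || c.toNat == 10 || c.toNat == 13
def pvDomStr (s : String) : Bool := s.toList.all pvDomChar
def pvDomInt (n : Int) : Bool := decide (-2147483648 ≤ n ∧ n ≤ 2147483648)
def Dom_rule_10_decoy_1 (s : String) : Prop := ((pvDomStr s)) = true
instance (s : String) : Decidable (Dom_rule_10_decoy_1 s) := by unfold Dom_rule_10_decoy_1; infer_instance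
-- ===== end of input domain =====

-- B replaces A's index-stack + slice-collected segments with a single pass keeping only a
-- depth counter and two flags (a closed pair seen; an uppercase letter seen at depth > 0).

-- ===== PORT A =====
-- the for-loop over enumerate(s): state (stack, segments); early 'return False' as a result
def pvLoopA (cs : List Char) : List (Int × Char) → List Int → List (List Char) → Bool
  | [], stack, segs =>
      -- 'if stack or not segments: return False; return any(any(...))'
      if stack ≠ [] ∨ segs = [] then false
      else segs.any (fun seg => seg.any (fun ch => decide ('A' ≤ ch) && decide (ch ≤ 'Z')))
  | (idx, ch) :: rest, stack, segs =>
      if ch = '(' then pvLoopA cs rest (stack ++ [idx]) segs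
      else if ch = ')' then
        match stack with
        | [] => false
        | b :: bs =>
            let start := (b :: bs).getLast (by simp)
            pvLoopA cs rest (b :: bs).dropLast
              (segs ++ [PySem.List.slice cs (some (start + 1)) (some idx)])
      else pvLoopA cs rest stack segs

def rule_10_decoy_1 (s : String) : Bool :=
  pvLoopA s.toList (PySem.List.enumerate s.toList 0) [] []

-- ===== PORT B =====
def pvLoopB : List Char → Int → Bool → Bool → Bool
  | [], depth, closed, upper => depth == 0 && closed && upper
  | ch :: rest, depth, closed, upper =>
      if ch = '(' then pvLoopB rest (depth + 1) closed upper
      else if ch = ')' then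
        if depth == 0 then false
        else pvLoopB rest (depth - 1) true upper
      else if 0 < depth ∧ 'A' ≤ ch ∧ ch ≤ 'Z' then pvLoopB rest depth closed true
      else pvLoopB rest depth closed upper

def rule_10_decoy_1_alt (s : String) : Bool :=
  pvLoopB s.toList 0 false false

-- ===== PRECONDITION & SPEC =====
def Spec_rule_10_decoy_1 (s : String) (out : Bool) : Prop := out = rule_10_decoy_1_alt s
instance (s : String) (out : Bool) : Decidable (Spec_rule_10_decoy_1 s out) := by unfold Spec_rule_10_decoy_1; infer_instance

-- ===== CLAIM (what is proved, stated in full; the proofs are below) =====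
def Claim_equal_rule_10_decoy_1 : Prop := ∀ (s : String), Dom_rule_10_decoy_1 s → Spec_rule_10_decoy_1 s (rule_10_decoy_1 s)

-- ===== LEMMAS AND PROOFS =====

def pvUp (c : Char) : Bool := decide ('A' ≤ c) && decide (c ≤ 'Z')

-- uppercase letter somewhere in the consumed prefix strictly after the bottom-most open paren
def pvExtra (cs : List Char) (stack : List Int) (n : Nat) : Bool :=
  match stack with
  | [] => false
  | b :: _ => ((cs.take n).drop (b.toNat + 1)).any pvUp

lemma pv_region_step (cs : List Char) (n : Nat) (ch : Char) (hget : cs[n]? = some ch)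
    (k : Nat) (hk : k ≤ n) :
    ((cs.take (n+1)).drop k).any pvUp = (((cs.take n).drop k).any pvUp || pvUp ch) := by
  have hn : n < cs.length := (List.getElem?_eq_some_iff.mp hget).1
  rw [List.take_add_one, hget,
      List.drop_append_of_le_length (by simp [List.length_take]; omega)]
  simp

lemma pv_region_split (cs : List Char) (a b n : Nat) (hab : a ≤ b) (hbn : b ≤ n) :
    ((cs.drop a).take (n - a)).any pvUp
      = (((cs.drop a).take (b - a)).any pvUp || ((cs.drop b).take (n - b)).any pvUp) := by
  have h1 : n - a = (b - a) + (n - b) := by omega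
  have h2 : (cs.drop a).drop (b - a) = cs.drop b := by
    rw [List.drop_drop]; congr 1; omega
  rw [h1, List.take_add, List.any_append, h2]

theorem pv_loop_eq (cs : List Char) (suf : List Char) :
    ∀ (n : Nat) (stack : List Int) (segs : List (List Char)),
      suf = cs.drop n →
      stack.Pairwise (· < ·) →
      (∀ b ∈ stack, 0 ≤ b ∧ b < (n : Int)) →
      pvLoopA cs (PySem.List.enumerate suf (n : Int)) stack segs
        = pvLoopB suf (stack.length : Int) (decide (segs ≠ []))
            ((segs.any (fun seg => seg.any pvUp)) || pvExtra cs stack n) := by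
  induction suf with
  | nil =>
    intro n stack segs hsuf hp hb
    cases stack with
    | nil =>
      by_cases hs : segs = [] <;>
        (simp [pvLoopA, pvLoopB, PySem.List.enumerate, pvExtra, hs]; try rfl)
    | cons b bs =>
      simp [pvLoopA, pvLoopB, PySem.List.enumerate]
      intro h
      exfalso; omega
  | cons ch suf ih =>
    intro n stack segs hsuf hp hb
    have hget : cs[n]? = some ch := by
      have h1 : (cs.drop n).head? = cs[n]? := List.head?_drop
      rw [← hsuf] at h1; simpa using h1.symm
    have hn : n < cs.length := (List.getElem?_eq_some_iff.mp hget).1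
    have hsuf' : suf = cs.drop (n+1) := by
      have h1 : (cs.drop n).tail = cs.drop (n+1) := List.tail_drop
      rw [← hsuf] at h1; simpa using h1
    have hcast : ((n : Int) + 1) = ((n+1 : Nat) : Int) := by push_cast; ring
    rw [PySem.List.enumerate_cons]
    by_cases hopen : ch = '('
    · subst hopen
      have hredB : ∀ (d : Int) (c u : Bool),
          pvLoopB ('(' :: suf) d c u = pvLoopB suf (d + 1) c u := by
        intro d c u; simp [pvLoopB]
      have hp' : (stack ++ [(n : Int)]).Pairwise (· < ·) := by
        refine List.pairwise_append.mpr ⟨hp, List.pairwise_singleton _ _, ?_⟩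
        intro a ha b hbm
        rcases List.mem_singleton.mp hbm with rfl
        exact (hb a ha).2
      have hb' : ∀ b ∈ stack ++ [(n : Int)], 0 ≤ b ∧ b < ((n+1 : Nat) : Int) := by
        intro b hbm
        rcases List.mem_append.mp hbm with h | h
        · exact ⟨(hb b h).1, by have := (hb b h).2; push_cast; omega⟩
        · rcases List.mem_singleton.mp h with rfl
          exact ⟨by positivity, by push_cast; omega⟩
      rw [hcast]
      show pvLoopA cs (PySem.List.enumerate suf ((n+1 : Nat) : Int)) (stack ++ [(n : Int)]) segs
        = pvLoopB ('(' :: suf) (stack.length : Int) (decide (segs ≠ []))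
            ((segs.any (fun seg => seg.any pvUp)) || pvExtra cs stack n)
      rw [ih (n+1) (stack ++ [(n : Int)]) segs hsuf' hp' hb', hredB]
      have e1 : (((stack ++ [(n : Int)]).length : Nat) : Int) = (stack.length : Int) + 1 := by
        simp
      have e2 : pvExtra cs (stack ++ [(n : Int)]) (n+1) = pvExtra cs stack n := by
        cases stack with
        | nil =>
          simp only [List.nil_append, pvExtra, Int.toNat_natCast]
          rw [List.drop_eq_nil_of_le (by simp [List.length_take])]
          rfl
        | cons b bs =>
          simp only [List.cons_append, pvExtra]
          have hbb := hb b List.mem_cons_self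
          rw [pv_region_step cs n '(' hget (b.toNat + 1) (by omega)]
          simp [pvUp]
      rw [e1, e2]
    · by_cases hclose : ch = ')'
      · subst hclose
        cases stack with
        | nil => simp [pvLoopA, pvLoopB]
        | cons b bs =>
          have hredB : ∀ (d : Int) (c u : Bool), d ≠ 0 →
              pvLoopB (')' :: suf) d c u = pvLoopB suf (d - 1) true u := by
            intro d c u hd; simp [pvLoopB, hd]
          have hne : (((b :: bs).length : Nat) : Int) ≠ 0 := by
            simp only [List.length_cons]; push_cast; omega
          have hp' : ((b :: bs).dropLast).Pairwise (· < ·) :=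
            hp.sublist (List.dropLast_sublist _)
          have hb' : ∀ x ∈ (b :: bs).dropLast, 0 ≤ x ∧ x < ((n+1 : Nat) : Int) := by
            intro x hx
            have hx' := hb x (List.mem_of_mem_dropLast hx)
            exact ⟨hx'.1, by have := hx'.2; push_cast; omega⟩
          rw [hcast]
          show pvLoopA cs (PySem.List.enumerate suf ((n+1 : Nat) : Int)) ((b :: bs).dropLast)
                (segs ++ [PySem.List.slice cs (some ((b :: bs).getLast (by simp) + 1)) (some (n : Int))])
            = pvLoopB (')' :: suf) (((b :: bs).length : Nat) : Int) (decide (segs ≠ []))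
                ((segs.any (fun seg => seg.any pvUp)) || pvExtra cs (b :: bs) n)
          rw [ih (n+1) _ _ hsuf' hp' hb', hredB _ _ _ hne]
          have e1 : ((((b :: bs).dropLast.length : Nat)) : Int)
              = (((b :: bs).length : Nat) : Int) - 1 := by
            simp only [List.length_dropLast, List.length_cons]; omega
          rw [e1, show (decide ((segs ++ [PySem.List.slice cs (some ((b :: bs).getLast (by simp) + 1)) (some (n : Int))]) ≠ [])) = true from by simp]
          have hsm : (b :: bs).getLast (by simp) ∈ b :: bs := List.getLast_mem _
          have hsb := hb _ hsm
          have hseg : (PySem.List.slice cs (some ((b :: bs).getLast (by simp) + 1)) (some (n : Int))).any pvUp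
              = ((cs.drop (((b :: bs).getLast (by simp)).toNat + 1)).take
                  (n - (((b :: bs).getLast (by simp)).toNat + 1))).any pvUp := by
            rw [PySem.List.slice_toNat cs (by omega) (by positivity)]
            have h1 : ((b :: bs).getLast (by simp) + 1).toNat
                = ((b :: bs).getLast (by simp)).toNat + 1 := by omega
            have h2 : ((n : Int)).toNat = n := by omega
            rw [h1, h2]
          congr 1
          cases bs with
          | nil =>
              have hb0 : (b :: ([] : List Int)).getLast (by simp) = b := rfl
              rw [show (b :: ([] : List Int)).dropLast = [] from rfl]
              simp only [pvExtra, List.any_append, List.any_cons, List.any_nil]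
              rw [hb0] at hseg ⊢
              rw [hseg]
              have hswap : ((cs.take n).drop (b.toNat + 1)).any pvUp
                  = ((cs.drop (b.toNat + 1)).take (n - (b.toNat + 1))).any pvUp := by
                rw [List.drop_take]
              rw [hswap]
              cases (segs.any fun seg => seg.any pvUp) <;>
                cases ((cs.drop (b.toNat + 1)).take (n - (b.toNat + 1))).any pvUp <;> rfl
          | cons b2 bs2 =>
              have hdl : (b :: b2 :: bs2).dropLast = b :: (b2 :: bs2).dropLast := rfl
              have hblt : b < (b :: b2 :: bs2).getLast (by simp) := by
                have hgl : (b :: b2 :: bs2).getLast (by simp)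
                    = (b2 :: bs2).getLast (by simp) := List.getLast_cons (by simp)
                have hm2 : (b :: b2 :: bs2).getLast (by simp) ∈ b2 :: bs2 := by
                  rw [hgl]; exact List.getLast_mem _
                exact (List.pairwise_cons.mp hp).1 _ hm2
              have hbb := hb b List.mem_cons_self
              rw [hdl]
              simp only [pvExtra, List.any_append, List.any_cons, List.any_nil, hseg]
              rw [pv_region_step cs n ')' hget (b.toNat + 1) (by omega)]
              have hold : ((cs.take n).drop (b.toNat + 1)).any pvUp
                  = (((cs.drop (b.toNat + 1)).take
                        ((((b :: b2 :: bs2).getLast (by simp)).toNat + 1) - (b.toNat + 1))).any pvUp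
                      || ((cs.drop (((b :: b2 :: bs2).getLast (by simp)).toNat + 1)).take
                            (n - (((b :: b2 :: bs2).getLast (by simp)).toNat + 1))).any pvUp) := by
                rw [List.drop_take]
                exact pv_region_split cs (b.toNat + 1) (((b :: b2 :: bs2).getLast (by simp)).toNat + 1) n
                  (by omega) (by omega)
              rw [hold]
              have hpvc : pvUp ')' = false := rfl
              rw [hpvc]
              cases (segs.any fun seg => seg.any pvUp) <;>
                cases ((cs.drop (b.toNat + 1)).take
                    ((((b :: b2 :: bs2).getLast (by simp)).toNat + 1) - (b.toNat + 1))).any pvUp <;>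
                cases ((cs.drop (((b :: b2 :: bs2).getLast (by simp)).toNat + 1)).take
                    (n - (((b :: b2 :: bs2).getLast (by simp)).toNat + 1))).any pvUp <;> rfl
      · have hredB : ∀ (d : Int) (c u : Bool),
            pvLoopB (ch :: suf) d c u
              = if 0 < d ∧ 'A' ≤ ch ∧ ch ≤ 'Z' then pvLoopB suf d c true
                else pvLoopB suf d c u := by
          intro d c u; simp [pvLoopB, hopen, hclose]
        have hb' : ∀ b ∈ stack, 0 ≤ b ∧ b < ((n+1 : Nat) : Int) := by
          intro b hbm
          exact ⟨(hb b hbm).1, by have := (hb b hbm).2; push_cast; omega⟩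
        rw [hcast]
        simp only [pvLoopA]
        rw [if_neg hopen, if_neg hclose]
        rw [ih (n+1) stack segs hsuf' hp hb', hredB]
        cases stack with
        | nil =>
          rw [if_neg (by simp)]
          simp [pvExtra]
        | cons b bs =>
          have hbb := hb b List.mem_cons_self
          have e2 : pvExtra cs (b :: bs) (n+1) = (pvExtra cs (b :: bs) n || pvUp ch) := by
            simp only [pvExtra]
            exact pv_region_step cs n ch hget (b.toNat + 1) (by omega)
          by_cases hu : 'A' ≤ ch ∧ ch ≤ 'Z'
          · rw [if_pos ⟨by simp only [List.length_cons]; push_cast; omega, hu.1, hu.2⟩]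
            have hpv : pvUp ch = true := by simp [pvUp, hu.1, hu.2]
            rw [e2, hpv]
            simp
          · rw [if_neg (by tauto)]
            have hpv : pvUp ch = false := by
              simp only [pvUp]
              rcases not_and_or.mp hu with h | h <;> simp [h]
            rw [e2, hpv]
            simp

-- ===== VERDICT (by name: the statement is the Claim_ definition above) =====
theorem rule_10_decoy_1_spec : Claim_equal_rule_10_decoy_1 := by
  intro s _
  unfold Spec_rule_10_decoy_1 rule_10_decoy_1 rule_10_decoy_1_alt
  have h := pv_loop_eq s.toList s.toList 0 [] [] (by simp) (by simp) (by simp)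
  simpa [pvExtra] using h
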